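-- pv_equiv track=rewrite | github.com/szimel/Sherlock-Holmes | data_transform.py | is_note_in_chord
-- ===== SOURCE A (Python) =====
-- from typing import Any, Dict, List, Optional, Tuple
--
-- NOTE_NAMES = ['C', 'C#', 'D', 'D#', 'E', 'F', 'F#', 'G', 'G#', 'A', 'A#', 'B']
--
-- NOTE_INDEX = {n: i for i, n in enumerate(NOTE_NAMES)}
--
-- CHORD_INTERVALS = {
--     "maj":  [0, 4, 7],
--     "min":  [0, 3, 7],
--     "7":    [0, 4, 7, 10],
--     "maj7": [0, 4, 7, 11],
--     "min7": [0, 3, 7, 10],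
--     "dim":  [0, 3, 6],
--     "aug":  [0, 4, 8],
--     "sus2": [0, 2, 7],
--     "sus4": [0, 5, 7],
-- }
--
-- def normalize_quality(q: Optional[str]) -> str:
--     if not q:
--         return "maj"
--     q = q.strip().lower()
--     if q in ("m", "minor"):
--         return "min"
--     if q == "major":
--         return "maj"
--     return q
--
-- def parse_chord_label(label: str) -> Tuple[Optional[str], Optional[str], bool]:
--     t = (label or "").strip()
--     if not t or t == "N" or ("no" in t.lower() and "chord" in t.lower()):
--         return None, None, True
--     if ":" not in t:
--         return None, None, True
--
--     root, quality = [p.strip() for p in t.split(":", 1)]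
--     if root not in NOTE_INDEX:
--         return None, None, True
--
--     return root, normalize_quality(quality), False
--
-- def is_note_in_chord(note: str, chord_label: str) -> bool:
--     if chord_label == 'N':
--         return False
--
--     root, quality, no_chord = parse_chord_label(chord_label)
--     if no_chord or root is None:
--         return False
--
--     root_idx = NOTE_INDEX[root]
--     intervals = CHORD_INTERVALS.get(normalize_quality(quality), [0, 4, 7])
--     chord_notes = [NOTE_NAMES[(root_idx + step) % 12] for step in intervals]
--     return note in chord_notes
-- ===== SOURCE B (Python) =====
-- NOTE_NAMES = ['C', 'C#', 'D', 'D#', 'E', 'F', 'F#', 'G', 'G#', 'A', 'A#', 'B']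
--
-- # 12-bit pitch-class mask per chord quality: bit i is set iff interval i belongs to the chord.
-- CHORD_MASKS = {
--     "maj":  0b000010010001,
--     "min":  0b000010001001,
--     "7":    0b010010010001,
--     "maj7": 0b100010010001,
--     "min7": 0b010010001001,
--     "dim":  0b000001001001,
--     "aug":  0b000100010001,
--     "sus2": 0b000010000101,
--     "sus4": 0b000010100001,
-- }
--
--
-- def _pitch_class(name):
--     i = 0
--     for n in NOTE_NAMES:
--         if n == name:
--             return i
--         i += 1
--     return -1
--
--
-- def is_note_in_chord(note, chord_label):
--     # Single self-contained pass: parse the label in place, then test the bit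
--     # for the note's interval above the root in the quality's pitch-class mask
--     # (instead of generating the chord's note names and scanning that list).
--     t = chord_label.strip()
--     low = t.lower()
--     if t == "" or t == "N" or ("no" in low and "chord" in low) or ":" not in t:
--         return False
--     root_s, qual_s = t.split(":", 1)
--     root_idx = _pitch_class(root_s.strip())
--     if root_idx < 0:
--         return False
--     note_idx = _pitch_class(note)
--     if note_idx < 0:
--         return False
--     q = qual_s.strip().lower()
--     if q in ("", "m", "minor"):
--         q = "min" if q else "maj"
--     elif q == "major":
--         q = "maj"
--     mask = CHORD_MASKS.get(q, 0b000010010001)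
--     return (mask >> ((note_idx - root_idx) % 12)) & 1 == 1
-- ===== Notes on version B (the rewrite author's own statement) =====
-- stated objective: alternative
-- what changed: B is self-contained and replaces A's pipeline (parse helper returning a tuple, dict-of-interval-lists, generate all chord note names, scan that list for `note`) by an inline parse plus a 12-bit pitch-class bitmask per quality: it looks up the note's pitch class by a linear scan of NOTE_NAMES and tests bit ((note_idx - root_idx) % 12) of the quality's mask.
import Mathlib
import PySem

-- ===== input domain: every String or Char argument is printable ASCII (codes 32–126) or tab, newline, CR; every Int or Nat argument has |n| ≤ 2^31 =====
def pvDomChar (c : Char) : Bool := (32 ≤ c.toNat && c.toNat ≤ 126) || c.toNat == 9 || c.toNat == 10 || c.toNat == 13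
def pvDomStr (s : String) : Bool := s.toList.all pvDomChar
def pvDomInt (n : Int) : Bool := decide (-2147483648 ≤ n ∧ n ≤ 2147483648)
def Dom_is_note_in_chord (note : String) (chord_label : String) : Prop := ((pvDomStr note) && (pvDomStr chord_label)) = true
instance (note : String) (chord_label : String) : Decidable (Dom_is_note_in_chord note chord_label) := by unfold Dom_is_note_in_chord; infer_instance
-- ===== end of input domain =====

-- B is self-contained: it parses the label inline and replaces A's pipeline (generate every
-- chord note name from interval lists, then scan that list for `note`) by a linear scan for
-- the note's pitch class and a bit test in a per-quality 12-bit pitch-class mask.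

-- ===== PORT A =====
def NOTE_NAMES : List String := ["C", "C#", "D", "D#", "E", "F", "F#", "G", "G#", "A", "A#", "B"]

-- {n: i for i, n in enumerate(NOTE_NAMES)}
def NOTE_INDEX : PySem.Dict String Int :=
  (PySem.List.enumerate NOTE_NAMES).foldl (fun d p => d.insert p.2 p.1) PySem.Dict.empty

def CHORD_INTERVALS : PySem.Dict String (List Int) := PySem.Dict.mk
  [("maj", [0, 4, 7]), ("min", [0, 3, 7]), ("7", [0, 4, 7, 10]), ("maj7", [0, 4, 7, 11]),
   ("min7", [0, 3, 7, 10]), ("dim", [0, 3, 6]), ("aug", [0, 4, 8]), ("sus2", [0, 2, 7]),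
   ("sus4", [0, 5, 7])]

def normalize_quality (q : Option String) : String :=
  match q with
  | none => "maj"                      -- `if not q` catches None …
  | some q =>
    if q = "" then "maj"               -- … and the empty string
    else
      let q' := PySem.Str.lower (PySem.Str.strip q)
      if q' = "m" ∨ q' = "minor" then "min"
      else if q' = "major" then "maj"
      else q'

def parse_chord_label (label : String) : Option String × Option String × Bool :=
  let t := PySem.Str.strip label       -- `(label or "")` = label: label is a str and `"" or ""` is ""
  if t = "" ∨ t = "N" ∨ (PySem.Str.isIn "no" (PySem.Str.lower t) ∧ PySem.Str.isIn "chord" (PySem.Str.lower t)) then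
    (none, none, true)
  else if ¬ PySem.Str.isIn ":" t then (none, none, true)
  else
    match PySem.Str.splitMax? t ":" 1 with
    | none => (none, none, true)       -- unreachable: the separator ":" is nonempty
    | some ps =>
      -- `root, quality = [p.strip() for p in t.split(":", 1)]`: exactly 2 pieces since ":" in t
      let root := PySem.Str.strip (ps.getD 0 "")
      let quality := PySem.Str.strip (ps.getD 1 "")
      if NOTE_INDEX.contains root = false then (none, none, true)
      else (some root, some (normalize_quality (some quality)), false)

def is_note_in_chord (note : String) (chord_label : String) : Bool :=
  if chord_label = "N" then false
  else
    match parse_chord_label chord_label with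
    | (root?, quality?, no_chord) =>
      if no_chord || root?.isNone then false
      else
        match root? with
        | none => false                -- unreachable: root?.isNone was checked
        | some root =>
          -- NOTE_INDEX[root]: key present (parse_chord_label checked), KeyError impossible
          let root_idx := (NOTE_INDEX.get? root).getD 0
          let intervals := CHORD_INTERVALS.getD (normalize_quality quality?) [0, 4, 7]
          -- NOTE_NAMES[(root_idx + step) % 12]: index always in range, IndexError impossible
          let chord_notes := intervals.map
            (fun step => ((PySem.List.pyGet? NOTE_NAMES (PySem.Int.mod (root_idx + step) 12)).getD ""))
          chord_notes.contains note

-- ===== PORT B =====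
-- 12-bit pitch-class mask per quality (bit i set ↔ interval i in the chord); the Python masks
-- are nonnegative ints, so Nat with >>> and % 2 is exact for Python's >> and & 1.
def CHORD_MASKS : PySem.Dict String Nat := PySem.Dict.mk
  [("maj", 145), ("min", 137), ("7", 1169), ("maj7", 2193), ("min7", 1161),
   ("dim", 73), ("aug", 273), ("sus2", 133), ("sus4", 161)]

-- _pitch_class: linear scan of NOTE_NAMES with a running counter, -1 on a miss
def pitch_class_go (name : String) : List String → Int → Int
  | [], _ => -1
  | n :: rest, i => if n = name then i else pitch_class_go name rest (i + 1)

def pitch_class (name : String) : Int := pitch_class_go name NOTE_NAMES 0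

def is_note_in_chord_alt (note : String) (chord_label : String) : Bool :=
  let t := PySem.Str.strip chord_label
  let low := PySem.Str.lower t
  if t = "" ∨ t = "N" ∨ (PySem.Str.isIn "no" low ∧ PySem.Str.isIn "chord" low) ∨ ¬ PySem.Str.isIn ":" t then
    false
  else
    match PySem.Str.splitMax? t ":" 1 with
    | none => false                    -- unreachable: the separator ":" is nonempty
    | some ps =>
      let root_idx := pitch_class (PySem.Str.strip (ps.getD 0 ""))
      if root_idx < 0 then false
      else
        let note_idx := pitch_class note
        if note_idx < 0 then false
        else
          let q0 := PySem.Str.lower (PySem.Str.strip (ps.getD 1 ""))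
          let q := if q0 = "" ∨ q0 = "m" ∨ q0 = "minor" then (if q0 ≠ "" then "min" else "maj")
                   else if q0 = "major" then "maj" else q0
          let mask := CHORD_MASKS.getD q 145
          -- (mask >> delta) & 1 == 1, delta = (note_idx - root_idx) % 12 ≥ 0 so .toNat is exact
          ((mask >>> (PySem.Int.mod (note_idx - root_idx) 12).toNat) % 2 == 1)

-- ===== PRECONDITION & SPEC =====
def Spec_is_note_in_chord (note : String) (chord_label : String) (out : Bool) : Prop := out = is_note_in_chord_alt note chord_label
instance (note : String) (chord_label : String) (out : Bool) : Decidable (Spec_is_note_in_chord note chord_label out) := by unfold Spec_is_note_in_chord; infer_instance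

-- ===== CLAIM (what is proved, stated in full; the proofs are below) =====
def Claim_equal_is_note_in_chord : Prop := ∀ (note : String) (chord_label : String), Dom_is_note_in_chord note chord_label → Spec_is_note_in_chord note chord_label (is_note_in_chord note chord_label)

-- ===== LEMMAS AND PROOFS =====

theorem note_index_mk : NOTE_INDEX = PySem.Dict.mk
    [("C", 0), ("C#", 1), ("D", 2), ("D#", 3), ("E", 4), ("F", 5), ("F#", 6),
     ("G", 7), ("G#", 8), ("A", 9), ("A#", 10), ("B", 11)] := by decide

-- a name either misses all 12 note names (dict lookup none, scan -1) or hits exactly one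
theorem lookup_cases (note : String) :
    (NOTE_INDEX.get? note = none ∧ pitch_class note = -1 ∧ ∀ k : Nat, k < 12 → note ≠ NOTE_NAMES[k]!) ∨
    (∃ k : Nat, k < 12 ∧ NOTE_INDEX.get? note = some (k : Int) ∧ pitch_class note = (k : Int) ∧ note = NOTE_NAMES[k]!) := by
  by_cases e0 : note = "C"
  · exact Or.inr ⟨0, by omega, by rw [e0]; decide, by rw [e0]; decide, by rw [e0]; decide⟩
  by_cases e1 : note = "C#"
  · exact Or.inr ⟨1, by omega, by rw [e1]; decide, by rw [e1]; decide, by rw [e1]; decide⟩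
  by_cases e2 : note = "D"
  · exact Or.inr ⟨2, by omega, by rw [e2]; decide, by rw [e2]; decide, by rw [e2]; decide⟩
  by_cases e3 : note = "D#"
  · exact Or.inr ⟨3, by omega, by rw [e3]; decide, by rw [e3]; decide, by rw [e3]; decide⟩
  by_cases e4 : note = "E"
  · exact Or.inr ⟨4, by omega, by rw [e4]; decide, by rw [e4]; decide, by rw [e4]; decide⟩
  by_cases e5 : note = "F"
  · exact Or.inr ⟨5, by omega, by rw [e5]; decide, by rw [e5]; decide, by rw [e5]; decide⟩
  by_cases e6 : note = "F#"
  · exact Or.inr ⟨6, by omega, by rw [e6]; decide, by rw [e6]; decide, by rw [e6]; decide⟩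
  by_cases e7 : note = "G"
  · exact Or.inr ⟨7, by omega, by rw [e7]; decide, by rw [e7]; decide, by rw [e7]; decide⟩
  by_cases e8 : note = "G#"
  · exact Or.inr ⟨8, by omega, by rw [e8]; decide, by rw [e8]; decide, by rw [e8]; decide⟩
  by_cases e9 : note = "A"
  · exact Or.inr ⟨9, by omega, by rw [e9]; decide, by rw [e9]; decide, by rw [e9]; decide⟩
  by_cases e10 : note = "A#"
  · exact Or.inr ⟨10, by omega, by rw [e10]; decide, by rw [e10]; decide, by rw [e10]; decide⟩
  by_cases e11 : note = "B"
  · exact Or.inr ⟨11, by omega, by rw [e11]; decide, by rw [e11]; decide, by rw [e11]; decide⟩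
  refine Or.inl ⟨?_, ?_, ?_⟩
  · rw [note_index_mk]
    rw [PySem.Dict.get?_mk_cons, if_neg (by simp only [beq_iff_eq]; exact fun h => e0 h.symm)]
    rw [PySem.Dict.get?_mk_cons, if_neg (by simp only [beq_iff_eq]; exact fun h => e1 h.symm)]
    rw [PySem.Dict.get?_mk_cons, if_neg (by simp only [beq_iff_eq]; exact fun h => e2 h.symm)]
    rw [PySem.Dict.get?_mk_cons, if_neg (by simp only [beq_iff_eq]; exact fun h => e3 h.symm)]
    rw [PySem.Dict.get?_mk_cons, if_neg (by simp only [beq_iff_eq]; exact fun h => e4 h.symm)]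
    rw [PySem.Dict.get?_mk_cons, if_neg (by simp only [beq_iff_eq]; exact fun h => e5 h.symm)]
    rw [PySem.Dict.get?_mk_cons, if_neg (by simp only [beq_iff_eq]; exact fun h => e6 h.symm)]
    rw [PySem.Dict.get?_mk_cons, if_neg (by simp only [beq_iff_eq]; exact fun h => e7 h.symm)]
    rw [PySem.Dict.get?_mk_cons, if_neg (by simp only [beq_iff_eq]; exact fun h => e8 h.symm)]
    rw [PySem.Dict.get?_mk_cons, if_neg (by simp only [beq_iff_eq]; exact fun h => e9 h.symm)]
    rw [PySem.Dict.get?_mk_cons, if_neg (by simp only [beq_iff_eq]; exact fun h => e10 h.symm)]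
    rw [PySem.Dict.get?_mk_cons, if_neg (by simp only [beq_iff_eq]; exact fun h => e11 h.symm)]
    simp [PySem.Dict.get?]
  · unfold pitch_class NOTE_NAMES
    rw [pitch_class_go, if_neg (fun h => e0 h.symm)]
    rw [pitch_class_go, if_neg (fun h => e1 h.symm)]
    rw [pitch_class_go, if_neg (fun h => e2 h.symm)]
    rw [pitch_class_go, if_neg (fun h => e3 h.symm)]
    rw [pitch_class_go, if_neg (fun h => e4 h.symm)]
    rw [pitch_class_go, if_neg (fun h => e5 h.symm)]
    rw [pitch_class_go, if_neg (fun h => e6 h.symm)]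
    rw [pitch_class_go, if_neg (fun h => e7 h.symm)]
    rw [pitch_class_go, if_neg (fun h => e8 h.symm)]
    rw [pitch_class_go, if_neg (fun h => e9 h.symm)]
    rw [pitch_class_go, if_neg (fun h => e10 h.symm)]
    rw [pitch_class_go, if_neg (fun h => e11 h.symm)]
    rfl
  · intro k hk
    interval_cases k
    · simpa using e0
    · simpa using e1
    · simpa using e2
    · simpa using e3
    · simpa using e4
    · simpa using e5
    · simpa using e6
    · simpa using e7
    · simpa using e8
    · simpa using e9
    · simpa using e10
    · simpa using e11

theorem names_inj : ∀ i, i < 12 → ∀ j, j < 12 → NOTE_NAMES[i]! = NOTE_NAMES[j]! → i = j := by decide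

theorem chord_intervals_bounds (q : String) :
    ∀ s ∈ CHORD_INTERVALS.getD q [0, 4, 7], 0 ≤ s ∧ s < 12 := by
  intro s hs
  simp only [CHORD_INTERVALS, PySem.Dict.getD_eq_get?_getD, PySem.Dict.get?_mk_cons] at hs
  split_ifs at hs <;>
    (simp only [Option.getD_some, PySem.Dict.get?] at hs; fin_cases hs <;> omega)

-- A's forward chord_notes scan equals a reverse pitch-class interval lookup
theorem tail_eq (note : String) (ridx : Int)
    (ivs : List Int) (hivs : ∀ s ∈ ivs, 0 ≤ s ∧ s < 12) :
    (ivs.map (fun step => ((PySem.List.pyGet? NOTE_NAMES (PySem.Int.mod (ridx + step) 12)).getD ""))).contains note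
    = (match NOTE_INDEX.get? note with
      | none => false
      | some ni => ivs.contains (PySem.Int.mod (ni - ridx) 12)) := by
  have hmod : ∀ a : Int, PySem.Int.mod a 12 = a % 12 := fun a =>
    PySem.Int.mod_eq_emod_of_pos (by norm_num)
  have hf : ∀ (step : Int) (j : Nat), j < 12 → (ridx + step) % 12 = (j : Int) →
      ((PySem.List.pyGet? NOTE_NAMES (PySem.Int.mod (ridx + step) 12)).getD "") = NOTE_NAMES[j]! := by
    intro step j hj hmj
    rw [hmod, hmj, PySem.List.pyGet?_natCast,
      List.getElem?_eq_getElem (by simpa [NOTE_NAMES] using hj), Option.getD_some,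
      getElem!_pos NOTE_NAMES _ (by simpa [NOTE_NAMES] using hj)]
  rcases lookup_cases note with ⟨hn, -, hne⟩ | ⟨k, hk, hs, -, heq⟩
  · rw [hn]
    simp only [List.contains_eq_mem, decide_eq_false_iff_not, List.mem_map, not_exists, not_and]
    intro step hstep
    have hnn : (0:Int) ≤ (ridx + step) % 12 := Int.emod_nonneg _ (by norm_num)
    rw [hf step ((ridx + step) % 12).toNat (by omega) (by omega)]
    exact fun h => hne _ (by omega) h.symm
  · rw [hs]
    simp only [List.contains_eq_mem]
    congr 1
    simp only [eq_iff_iff, List.mem_map]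
    rw [hmod ((k : Int) - ridx)]
    constructor
    · rintro ⟨step, hstep, hfs⟩
      have hb := hivs step hstep
      have hnn : (0:Int) ≤ (ridx + step) % 12 := Int.emod_nonneg _ (by norm_num)
      rw [hf step ((ridx + step) % 12).toNat (by omega) (by omega)] at hfs
      have hj : ((ridx + step) % 12).toNat = k :=
        names_inj _ (by omega) _ hk (by rw [hfs, ← heq])
      have hst : step = ((k : Int) - ridx) % 12 := by omega
      rwa [hst] at hstep
    · intro hmem
      have hb := hivs _ hmem
      refine ⟨((k : Int) - ridx) % 12, hmem, ?_⟩
      rw [hf _ k hk (by omega), heq]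

-- B's mask bit test agrees with A's interval-list membership for every quality key
theorem mask_matches (q : String) (d : Nat) (hd : d < 12) :
    ((CHORD_MASKS.getD q 145 >>> d) % 2 == 1) = (CHORD_INTERVALS.getD q [0, 4, 7]).contains ((d : Nat) : Int) := by
  by_cases h0 : q = "maj"
  · subst h0; interval_cases d <;> decide
  by_cases h1 : q = "min"
  · subst h1; interval_cases d <;> decide
  by_cases h2 : q = "7"
  · subst h2; interval_cases d <;> decide
  by_cases h3 : q = "maj7"
  · subst h3; interval_cases d <;> decide
  by_cases h4 : q = "min7"
  · subst h4; interval_cases d <;> decide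
  by_cases h5 : q = "dim"
  · subst h5; interval_cases d <;> decide
  by_cases h6 : q = "aug"
  · subst h6; interval_cases d <;> decide
  by_cases h7 : q = "sus2"
  · subst h7; interval_cases d <;> decide
  by_cases h8 : q = "sus4"
  · subst h8; interval_cases d <;> decide
  have hm : CHORD_MASKS.getD q 145 = 145 := by
    rw [CHORD_MASKS, PySem.Dict.getD_eq_get?_getD]
    rw [PySem.Dict.get?_mk_cons, if_neg (by simp only [beq_iff_eq]; exact fun h => h0 h.symm)]
    rw [PySem.Dict.get?_mk_cons, if_neg (by simp only [beq_iff_eq]; exact fun h => h1 h.symm)]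
    rw [PySem.Dict.get?_mk_cons, if_neg (by simp only [beq_iff_eq]; exact fun h => h2 h.symm)]
    rw [PySem.Dict.get?_mk_cons, if_neg (by simp only [beq_iff_eq]; exact fun h => h3 h.symm)]
    rw [PySem.Dict.get?_mk_cons, if_neg (by simp only [beq_iff_eq]; exact fun h => h4 h.symm)]
    rw [PySem.Dict.get?_mk_cons, if_neg (by simp only [beq_iff_eq]; exact fun h => h5 h.symm)]
    rw [PySem.Dict.get?_mk_cons, if_neg (by simp only [beq_iff_eq]; exact fun h => h6 h.symm)]
    rw [PySem.Dict.get?_mk_cons, if_neg (by simp only [beq_iff_eq]; exact fun h => h7 h.symm)]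
    rw [PySem.Dict.get?_mk_cons, if_neg (by simp only [beq_iff_eq]; exact fun h => h8 h.symm)]
    simp [PySem.Dict.get?]
  have hi : CHORD_INTERVALS.getD q [0, 4, 7] = [0, 4, 7] := by
    rw [CHORD_INTERVALS, PySem.Dict.getD_eq_get?_getD]
    rw [PySem.Dict.get?_mk_cons, if_neg (by simp only [beq_iff_eq]; exact fun h => h0 h.symm)]
    rw [PySem.Dict.get?_mk_cons, if_neg (by simp only [beq_iff_eq]; exact fun h => h1 h.symm)]
    rw [PySem.Dict.get?_mk_cons, if_neg (by simp only [beq_iff_eq]; exact fun h => h2 h.symm)]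
    rw [PySem.Dict.get?_mk_cons, if_neg (by simp only [beq_iff_eq]; exact fun h => h3 h.symm)]
    rw [PySem.Dict.get?_mk_cons, if_neg (by simp only [beq_iff_eq]; exact fun h => h4 h.symm)]
    rw [PySem.Dict.get?_mk_cons, if_neg (by simp only [beq_iff_eq]; exact fun h => h5 h.symm)]
    rw [PySem.Dict.get?_mk_cons, if_neg (by simp only [beq_iff_eq]; exact fun h => h6 h.symm)]
    rw [PySem.Dict.get?_mk_cons, if_neg (by simp only [beq_iff_eq]; exact fun h => h7 h.symm)]
    rw [PySem.Dict.get?_mk_cons, if_neg (by simp only [beq_iff_eq]; exact fun h => h8 h.symm)]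
    simp [PySem.Dict.get?]
  rw [hm, hi]
  interval_cases d <;> decide

-- ---- strip/lower algebra used to align A's double normalization with B's single pass ----

theorem upper_bounds {c : Char} (h : PySem.Chars.isupper c = true) : 65 ≤ c.toNat ∧ c.toNat ≤ 90 := by
  unfold PySem.Chars.isupper at h
  simp only [Bool.and_eq_true, decide_eq_true_eq, Char.le_def, UInt32.le_iff_toNat_le] at h
  exact h

theorem lower_toNat {c : Char} (h1 : 65 ≤ c.toNat) (h2 : c.toNat ≤ 90) :
    (Char.ofNat (c.toNat + 32)).toNat = c.toNat + 32 := by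
  rw [Char.toNat_ofNat, if_pos]
  unfold Nat.isValidChar
  exact Or.inl (by omega)

theorem isspace_lowerChar (c : Char) : PySem.Chars.isspace (PySem.Chars.lowerChar c) = PySem.Chars.isspace c := by
  unfold PySem.Chars.lowerChar
  split
  · rename_i h
    obtain ⟨h1, h2⟩ := upper_bounds h
    have hv := lower_toNat h1 h2
    unfold PySem.Chars.isspace
    simp only [hv]
    have e1 : ∀ n, 65 ≤ n → n ≤ 122 → (decide (n = 32) || decide (9 ≤ n) && decide (n ≤ 13) || decide (28 ≤ n) && decide (n ≤ 31) || decide (n = 133) || decide (n = 160) || decide (n = 5760) || decide (8192 ≤ n) && decide (n ≤ 8202) || decide (n = 8232) || decide (n = 8233) || decide (n = 8239) || decide (n = 8287) || decide (n = 12288)) = false := by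
      intro n ha hb
      simp only [Bool.or_eq_false_iff, Bool.and_eq_false_iff, decide_eq_false_iff_not]
      omega
    rw [e1 _ (by omega) (by omega), e1 _ (by omega) (by omega)]
  · rfl

theorem lowerChar_lowerChar (c : Char) : PySem.Chars.lowerChar (PySem.Chars.lowerChar c) = PySem.Chars.lowerChar c := by
  unfold PySem.Chars.lowerChar
  split
  · rename_i h
    obtain ⟨h1, h2⟩ := upper_bounds h
    have hv := lower_toNat h1 h2
    rw [if_neg]
    intro hu
    obtain ⟨h3, h4⟩ := upper_bounds hu
    omega
  · rfl

-- a prefix of a dropWhile-result needs no further dropping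
theorem dropWhile_prefix_fix {α : Type} (p : α → Bool) (l y : List α)
    (hy : y <+: List.dropWhile p l) : List.dropWhile p y = y := by
  cases y with
  | nil => rfl
  | cons a t =>
    have hne : List.dropWhile p l ≠ [] := by
      intro h; rw [h] at hy; simp at hy
    have hh : (List.dropWhile p l).head hne = a := by
      obtain ⟨r, hr⟩ := hy
      simp [← hr]
    have := List.head_dropWhile_not p hne
    rw [hh] at this
    rw [List.dropWhile_cons, if_neg (by simp [this])]

theorem rstrip_prefix (x : List Char) : PySem.Chars.rstrip x <+: x := by
  unfold PySem.Chars.rstrip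
  have h := List.dropWhile_suffix (l := x.reverse) PySem.Chars.isspace
  have := List.reverse_prefix.mpr (by simpa using h)
  simpa using this

theorem chars_strip_strip (x : List Char) : PySem.Chars.strip (PySem.Chars.strip x) = PySem.Chars.strip x := by
  unfold PySem.Chars.strip
  have h1 : PySem.Chars.lstrip (PySem.Chars.rstrip (PySem.Chars.lstrip x)) = PySem.Chars.rstrip (PySem.Chars.lstrip x) := by
    unfold PySem.Chars.lstrip
    exact dropWhile_prefix_fix _ x _ (rstrip_prefix _)
  rw [h1]
  unfold PySem.Chars.rstrip
  rw [List.reverse_reverse]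
  congr 1
  exact dropWhile_prefix_fix _ _ _ (List.prefix_refl _)

theorem chars_strip_lower (x : List Char) :
    PySem.Chars.strip (PySem.Chars.lower x) = PySem.Chars.lower (PySem.Chars.strip x) := by
  have hcomp : (PySem.Chars.isspace ∘ PySem.Chars.lowerChar) = PySem.Chars.isspace := by
    funext c; exact isspace_lowerChar c
  unfold PySem.Chars.strip PySem.Chars.lstrip PySem.Chars.rstrip PySem.Chars.lower
  rw [List.dropWhile_map, hcomp, ← List.map_reverse, List.dropWhile_map, hcomp, List.map_reverse]

theorem chars_lower_lower (x : List Char) :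
    PySem.Chars.lower (PySem.Chars.lower x) = PySem.Chars.lower x := by
  unfold PySem.Chars.lower
  rw [List.map_map]
  exact List.map_congr_left (fun c _ => lowerChar_lowerChar c)

theorem str_strip_strip (s : String) : PySem.Str.strip (PySem.Str.strip s) = PySem.Str.strip s := by
  apply String.toList_injective
  simp only [PySem.Str.toList_strip]
  exact chars_strip_strip _

theorem str_strip_lower (s : String) :
    PySem.Str.strip (PySem.Str.lower s) = PySem.Str.lower (PySem.Str.strip s) := by
  apply String.toList_injective
  simp only [PySem.Str.toList_strip, PySem.Str.toList_lower]
  exact chars_strip_lower _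

theorem str_lower_lower (s : String) :
    PySem.Str.lower (PySem.Str.lower s) = PySem.Str.lower s := by
  apply String.toList_injective
  simp only [PySem.Str.toList_lower]
  exact chars_lower_lower _

theorem str_lower_eq_empty {s : String} : PySem.Str.lower s = "" ↔ s = "" := by
  constructor
  · intro h
    have := congrArg String.toList h
    simp only [PySem.Str.toList_lower, PySem.Chars.lower] at this
    have : s.toList = [] := by
      cases hs : s.toList with
      | nil => rfl
      | cons a t => rw [hs] at this; simp at this
    apply String.toList_injective
    simpa using this
  · intro h; rw [h]; decide

-- A's normalize_quality ∘ normalize_quality on a stripped piece = B's single inline normalization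
theorem norm_core (qs q0 : String) (hq0 : PySem.Str.lower qs = q0)
    (hqs : PySem.Str.strip qs = qs) (hs0 : PySem.Str.strip q0 = q0)
    (hl0 : PySem.Str.lower q0 = q0) (hemp : q0 = "" ↔ qs = "") :
    normalize_quality (some (normalize_quality (some qs))) =
    (if q0 = "" ∨ q0 = "m" ∨ q0 = "minor" then (if q0 ≠ "" then "min" else "maj")
     else if q0 = "major" then "maj" else q0) := by
  by_cases hq : qs = ""
  · have h0 : q0 = "" := hemp.mpr hq
    have hin : normalize_quality (some qs) = "maj" := by rw [hq]; decide
    rw [hin, if_pos (Or.inl h0), if_neg (fun h => h h0)]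
    decide
  · have h0 : q0 ≠ "" := fun h => hq (hemp.mp h)
    have hin : normalize_quality (some qs) =
        (if q0 = "m" ∨ q0 = "minor" then "min" else if q0 = "major" then "maj" else q0) := by
      simp only [normalize_quality]
      rw [if_neg hq, hqs, hq0]
    rw [hin]
    by_cases hm : q0 = "m" ∨ q0 = "minor"
    · rw [if_pos hm, if_pos (Or.inr hm), if_pos h0]
      decide
    · have hm1 : q0 ≠ "m" := fun h => hm (Or.inl h)
      have hm2 : q0 ≠ "minor" := fun h => hm (Or.inr h)
      have hno : ¬ (q0 = "" ∨ q0 = "m" ∨ q0 = "minor") :=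
        fun h => h.elim h0 (fun h' => h'.elim hm1 hm2)
      rw [if_neg hm]
      by_cases hmaj : q0 = "major"
      · rw [if_pos hmaj, if_neg hno]
        decide
      · rw [if_neg hmaj, if_neg hno]
        simp only [normalize_quality]
        rw [if_neg h0, hs0, hl0, if_neg hm, if_neg hmaj]

-- A's normalize_quality ∘ normalize_quality on a stripped piece = B's single inline normalization
theorem norm_eq (piece : String) :
    normalize_quality (some (normalize_quality (some (PySem.Str.strip piece)))) =
    (if PySem.Str.lower (PySem.Str.strip piece) = "" ∨ PySem.Str.lower (PySem.Str.strip piece) = "m" ∨ PySem.Str.lower (PySem.Str.strip piece) = "minor" then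
      (if PySem.Str.lower (PySem.Str.strip piece) ≠ "" then "min" else "maj")
     else if PySem.Str.lower (PySem.Str.strip piece) = "major" then "maj"
     else PySem.Str.lower (PySem.Str.strip piece)) := by
  refine norm_core (PySem.Str.strip piece) (PySem.Str.lower (PySem.Str.strip piece)) rfl
    (str_strip_strip piece) ?_ ?_ ?_
  · rw [str_strip_lower, str_strip_strip]
  · rw [str_lower_lower]
  · constructor
    · exact fun h => str_lower_eq_empty.mp h
    · intro h; rw [h]; decide

-- ===== VERDICT (by name: the statement is the Claim_ definition above) =====
theorem is_note_in_chord_spec : Claim_equal_is_note_in_chord := by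
  intro note chord_label _
  unfold Spec_is_note_in_chord
  by_cases hN : chord_label = "N"
  · subst hN
    have hb : is_note_in_chord_alt note "N" = false := by
      rw [is_note_in_chord_alt.eq_def]
      dsimp only
      rw [if_pos (Or.inr (Or.inl (by decide)))]
    rw [hb, is_note_in_chord.eq_def, if_pos rfl]
  · by_cases hg1 : PySem.Str.strip chord_label = "" ∨ PySem.Str.strip chord_label = "N" ∨
        (PySem.Str.isIn "no" (PySem.Str.lower (PySem.Str.strip chord_label)) ∧
         PySem.Str.isIn "chord" (PySem.Str.lower (PySem.Str.strip chord_label)))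
    · have hp : parse_chord_label chord_label = (none, none, true) := by
        rw [parse_chord_label.eq_def]
        dsimp only
        rw [if_pos hg1]
      have ha : is_note_in_chord note chord_label = false := by
        rw [is_note_in_chord.eq_def, if_neg hN, hp]
        dsimp only
        simp
      have hb : is_note_in_chord_alt note chord_label = false := by
        rw [is_note_in_chord_alt.eq_def]
        dsimp only
        rcases hg1 with h | h | h
        · rw [if_pos (Or.inl h)]
        · rw [if_pos (Or.inr (Or.inl h))]
        · rw [if_pos (Or.inr (Or.inr (Or.inl h)))]
      rw [ha, hb]
    · by_cases hg2 : PySem.Str.isIn ":" (PySem.Str.strip chord_label) = true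
      · -- the separator is present: both sides split the label
        have hnA : ¬ PySem.Str.strip chord_label = "" := fun h => hg1 (Or.inl h)
        have hnB : ¬ PySem.Str.strip chord_label = "N" := fun h => hg1 (Or.inr (Or.inl h))
        have hnC : ¬ (PySem.Str.isIn "no" (PySem.Str.lower (PySem.Str.strip chord_label)) ∧
            PySem.Str.isIn "chord" (PySem.Str.lower (PySem.Str.strip chord_label))) :=
          fun h => hg1 (Or.inr (Or.inr h))
        have hng : ¬ (PySem.Str.strip chord_label = "" ∨ PySem.Str.strip chord_label = "N" ∨
            (PySem.Str.isIn "no" (PySem.Str.lower (PySem.Str.strip chord_label)) ∧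
             PySem.Str.isIn "chord" (PySem.Str.lower (PySem.Str.strip chord_label))) ∨
            ¬ PySem.Str.isIn ":" (PySem.Str.strip chord_label) = true) :=
          fun h => h.elim hnA (fun h => h.elim hnB (fun h => h.elim hnC (fun h => h hg2)))
        rcases hsp : PySem.Str.splitMax? (PySem.Str.strip chord_label) ":" 1 with _ | ps
        · have hp : parse_chord_label chord_label = (none, none, true) := by
            rw [parse_chord_label.eq_def]
            dsimp only
            rw [if_neg hg1, if_neg (not_not_intro hg2), hsp]
          have ha : is_note_in_chord note chord_label = false := by
            rw [is_note_in_chord.eq_def, if_neg hN, hp]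
            dsimp only
            simp
          have hb : is_note_in_chord_alt note chord_label = false := by
            rw [is_note_in_chord_alt.eq_def]
            dsimp only
            rw [if_neg hng, hsp]
          rw [ha, hb]
        · rcases lookup_cases (PySem.Str.strip (ps.getD 0 "")) with ⟨hroot, hpc, -⟩ | ⟨k, hk, hroot, hpc, -⟩
          · -- root unknown: A's contains-check fails, B's scan returns -1
            have hp : parse_chord_label chord_label = (none, none, true) := by
              rw [parse_chord_label.eq_def]
              dsimp only
              rw [if_neg hg1, if_neg (not_not_intro hg2), hsp]
              dsimp only
              rw [if_pos (by rw [PySem.Dict.contains_eq_isSome_get?, hroot]; rfl)]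
            have ha : is_note_in_chord note chord_label = false := by
              rw [is_note_in_chord.eq_def, if_neg hN, hp]
              dsimp only
              simp
            have hb : is_note_in_chord_alt note chord_label = false := by
              rw [is_note_in_chord_alt.eq_def]
              dsimp only
              rw [if_neg hng, hsp]
              dsimp only
              rw [hpc, if_pos (by norm_num)]
            rw [ha, hb]
          · -- root known at index k: A scans its generated chord notes, B tests the mask bit
            have hp : parse_chord_label chord_label =
                (some (PySem.Str.strip (ps.getD 0 "")),
                 some (normalize_quality (some (PySem.Str.strip (ps.getD 1 "")))), false) := by
              rw [parse_chord_label.eq_def]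
              dsimp only
              rw [if_neg hg1, if_neg (not_not_intro hg2), hsp]
              dsimp only
              rw [if_neg (by rw [PySem.Dict.contains_eq_isSome_get?, hroot]; simp)]
            have ha : is_note_in_chord note chord_label =
                ((CHORD_INTERVALS.getD (normalize_quality (some (normalize_quality (some (PySem.Str.strip (ps.getD 1 "")))))) [0, 4, 7]).map
                  (fun step => ((PySem.List.pyGet? NOTE_NAMES (PySem.Int.mod ((k : Int) + step) 12)).getD ""))).contains note := by
              rw [is_note_in_chord.eq_def, if_neg hN, hp]
              dsimp only
              rw [if_neg (by simp), hroot]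
              rfl
            rw [ha, tail_eq note (k : Int) _ (chord_intervals_bounds _)]
            have hb0 : is_note_in_chord_alt note chord_label =
                (if pitch_class note < 0 then false
                 else
                  ((CHORD_MASKS.getD
                      (if PySem.Str.lower (PySem.Str.strip (ps.getD 1 "")) = "" ∨ PySem.Str.lower (PySem.Str.strip (ps.getD 1 "")) = "m" ∨ PySem.Str.lower (PySem.Str.strip (ps.getD 1 "")) = "minor" then
                        (if PySem.Str.lower (PySem.Str.strip (ps.getD 1 "")) ≠ "" then "min" else "maj")
                       else if PySem.Str.lower (PySem.Str.strip (ps.getD 1 "")) = "major" then "maj"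
                       else PySem.Str.lower (PySem.Str.strip (ps.getD 1 ""))) 145
                    >>> (PySem.Int.mod (pitch_class note - (k : Int)) 12).toNat) % 2 == 1)) := by
              rw [is_note_in_chord_alt.eq_def]
              dsimp only
              rw [if_neg hng, hsp]
              dsimp only
              rw [hpc, if_neg (by omega : ¬ ((k : Int) < 0))]
            rw [hb0, ← norm_eq (ps.getD 1 "")]
            rcases lookup_cases note with ⟨hnote, hnpc, -⟩ | ⟨j, hj, hnote, hnpc, -⟩
            · rw [hnote, hnpc, if_pos (by norm_num)]
            · rw [hnote, hnpc, if_neg (by omega : ¬ ((j : Int) < 0))]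
              have hdnn : (0:Int) ≤ PySem.Int.mod ((j : Int) - (k : Int)) 12 ∧
                  PySem.Int.mod ((j : Int) - (k : Int)) 12 < 12 := by
                rw [PySem.Int.mod_eq_emod_of_pos (by norm_num)]
                exact ⟨Int.emod_nonneg _ (by norm_num), Int.emod_lt_of_pos _ (by norm_num)⟩
              have hd12 : (PySem.Int.mod ((j : Int) - (k : Int)) 12).toNat < 12 := by omega
              rw [mask_matches _ _ hd12]
              have hcast : (((PySem.Int.mod ((j : Int) - (k : Int)) 12).toNat : Nat) : Int) =
                  PySem.Int.mod ((j : Int) - (k : Int)) 12 := by omega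
              rw [hcast]
      · -- no ':' in the label: both sides bail out
        have hp : parse_chord_label chord_label = (none, none, true) := by
          rw [parse_chord_label.eq_def]
          dsimp only
          rw [if_neg hg1, if_pos hg2]
        have ha : is_note_in_chord note chord_label = false := by
          rw [is_note_in_chord.eq_def, if_neg hN, hp]
          dsimp only
          simp
        have hb : is_note_in_chord_alt note chord_label = false := by
          rw [is_note_in_chord_alt.eq_def]
          dsimp only
          rw [if_pos (Or.inr (Or.inr (Or.inr hg2)))]
        rw [ha, hb]
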